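-- pv_equiv track=rewrite | github.com/leisurecodog/School | python/HW2/pascal.py | count
-- ===== SOURCE A (Python) =====
-- def count(num):
-- # count the longest width of pascal triangle
--     row = [1]
--
--     num = int(num)
--
--     wid = 0
--     for i in range(num - 1):
--         row = [l + r for l ,r in zip([0] + row , row + [0])]
--         if i != num-2:
--             continue
--         st = ''
--         for s in row:
--             st += str(s) + ' '
--         wid = len(st) - 1
--     return wid
-- ===== SOURCE B (Python) =====
-- def count(num):
--     # Width of the printed last row of the Pascal triangle of `num` rows:
--     # compute only the final row via incremental binomials C(n,k), summing
--     # digit lengths plus the n separating spaces (O(num) big-int ops).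
--     num = int(num)
--     if num < 2:
--         return 0
--     n = num - 1
--     total = n  # the n spaces between the n+1 entries
--     c = 1
--     for k in range(n + 1):
--         total += len(str(c))
--         c = c * (n - k) // (k + 1)
--     return total
-- ===== Notes on version B (the rewrite author's own statement) =====
-- stated objective: alternative
-- what changed: Instead of building every Pascal row by pairwise zip-addition and concatenating the last row into one string, B computes only the last row's entries incrementally as binomials C(n,k)=C(n,k-1)*(n-k+1)//k and sums their digit lengths plus the n spaces (fewer big-int additions, measured 8.44x at n=1024, but digit-length work keeps both quadratic at the largest sizes).
import Mathlib
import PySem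

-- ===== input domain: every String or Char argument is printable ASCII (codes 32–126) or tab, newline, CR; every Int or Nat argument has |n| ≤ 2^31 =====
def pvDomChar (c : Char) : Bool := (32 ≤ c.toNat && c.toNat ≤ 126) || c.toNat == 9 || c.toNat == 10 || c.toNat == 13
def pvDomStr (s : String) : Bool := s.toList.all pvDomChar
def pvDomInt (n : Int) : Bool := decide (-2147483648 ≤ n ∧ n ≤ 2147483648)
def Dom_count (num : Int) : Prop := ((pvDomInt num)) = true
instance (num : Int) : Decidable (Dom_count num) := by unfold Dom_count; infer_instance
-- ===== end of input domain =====

-- B computes only the last Pascal row via incremental binomials C(n,k) and sums digit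
-- lengths plus spaces, instead of A's row-by-row rebuild and string concatenation.


-- ===== PORT A =====
-- row = [l + r for l, r in zip([0] + row, row + [0])]
def pascalStep (row : List Int) : List Int :=
  (List.zip (0 :: row) (row ++ [0])).map (fun p => p.1 + p.2)

-- st = ''; for s in row: st += str(s) + ' '; wid = len(st) - 1
-- (the string is ported on the List Char side of PySem.Str; len = list length, exact)
def countWid (row : List Int) : Int :=
  ((row.foldl (fun (st : List Char) s => st ++ (PySem.Int.toChars s ++ [' '])) []).length : Int) - 1

def count (num : Int) : Int :=
  ((PySem.List.pyRange 0 (num - 1) 1).foldl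
    (fun (st : List Int × Int) i =>
      let row := pascalStep st.1
      if i ≠ num - 2 then (row, st.2)
      else (row, countWid row))
    ([1], 0)).2

-- ===== PORT B =====
def count_alt (num : Int) : Int :=
  if num < 2 then 0
  else
    let n := num - 1
    ((PySem.List.pyRange 0 (n + 1) 1).foldl
      (fun (st : Int × Int) k =>
        (st.1 + ((PySem.Int.toChars st.2).length : Int),
         PySem.Int.floordiv (st.2 * (n - k)) (k + 1)))
      (n, 1)).1

-- ===== PRECONDITION & SPEC =====
def Spec_count (num : Int) (out : Int) : Prop := out = count_alt num
instance (num : Int) (out : Int) : Decidable (Spec_count num out) := by unfold Spec_count; infer_instance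

-- ===== CLAIM (what is proved, stated in full; the proofs are below) =====
def Claim_equal_count : Prop := ∀ (num : Int), Dom_count num → Spec_count num (count num)

-- ===== LEMMAS AND PROOFS =====

-- the m-th Pascal row (0-indexed) as binomial coefficients
def binRow (m : Nat) : List Int := (List.range (m + 1)).map (fun k => ((m.choose k : Nat) : Int))

lemma binRow_length (m : Nat) : (binRow m).length = m + 1 := by
  simp [binRow]

lemma pascalStep_binRow (m : Nat) : pascalStep (binRow m) = binRow (m + 1) := by
  apply List.ext_getElem
  · simp [pascalStep, binRow]
  · intro i h1 h2
    have hi : i < m + 2 := by simp [binRow_length] at h2; omega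
    simp only [pascalStep, List.getElem_map, List.getElem_zip]
    rcases i with _ | j
    · simp [binRow]
    · have hj : j < m + 1 := Nat.lt_of_succ_lt_succ hi
      rw [List.getElem_cons_succ]
      by_cases hje : j + 1 < m + 1
      · rw [List.getElem_append_left (by simpa [binRow_length] using hje)]
        simp only [binRow, List.getElem_map, List.getElem_range]
        rw [Nat.choose_succ_succ]
        push_cast
        ring
      · have hj1 : j + 1 = m + 1 := by omega
        rw [List.getElem_append_right (by simp [binRow_length]; omega)]
        simp only [binRow, List.getElem_map, List.getElem_range, List.getElem_singleton]
        have hz : m.choose (j + 1) = 0 := by rw [hj1]; exact Nat.choose_succ_self m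
        rw [Nat.choose_succ_succ]
        simp [Nat.succ_eq_add_one, hz]

-- invariant of A's loop before the last iteration
lemma A_inv (num : Int) (t : Nat) (ht : (t : Int) ≤ num - 2) :
    (PySem.List.pyRange 0 t 1).foldl
      (fun (st : List Int × Int) i =>
        let row := pascalStep st.1
        if i ≠ num - 2 then (row, st.2)
        else (row, countWid row))
      ([1], 0) = (binRow t, 0) := by
  induction t with
  | zero => simp [binRow]
  | succ t ih =>
    have h1 : ((t : Int) + 1) = ((t + 1 : Nat) : Int) := by push_cast; ring
    have hsplit := PySem.List.pyRange_one_succ_right (a := 0) (b := (t : Int)) (by positivity)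
    rw [← h1, hsplit, List.foldl_append, ih (by push_cast at ht ⊢; omega)]
    have hne : (t : Int) ≠ num - 2 := by push_cast at ht; omega
    simp only [List.foldl_cons, List.foldl_nil, if_pos hne, pascalStep_binRow]

-- length of A's string accumulation
lemma len_fold (row : List Int) (init : List Char) :
    ((row.foldl (fun (st : List Char) s => st ++ (PySem.Int.toChars s ++ [' '])) init).length : Int)
      = (init.length : Int) + (row.map (fun x => ((PySem.Int.toChars x).length : Int) + 1)).sum := by
  induction row generalizing init with
  | nil => simp
  | cons x xs ih =>
    simp only [List.foldl_cons, List.map_cons, List.sum_cons, ih, List.length_append,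
      List.length_cons, List.length_nil]
    push_cast
    ring

-- invariant of B's loop: running total and binomial coefficient
lemma B_inv (num : Int) (N1 : Nat) (hn : (N1 : Int) = num - 1) (t : Nat) (ht : t ≤ N1 + 1) :
    (PySem.List.pyRange 0 t 1).foldl
      (fun (st : Int × Int) k =>
        (st.1 + ((PySem.Int.toChars st.2).length : Int),
         PySem.Int.floordiv (st.2 * (num - 1 - k)) (k + 1)))
      (num - 1, 1)
    = (num - 1 + ((List.range t).map
          (fun j => ((PySem.Int.toChars ((N1.choose j : Nat) : Int)).length : Int))).sum,
       ((N1.choose t : Nat) : Int)) := by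
  induction t with
  | zero => simp
  | succ t ih =>
    have h1 : ((t : Int) + 1) = ((t + 1 : Nat) : Int) := by push_cast; ring
    have hsplit := PySem.List.pyRange_one_succ_right (a := 0) (b := (t : Int)) (by positivity)
    rw [← h1, hsplit, List.foldl_append, ih (by omega)]
    simp only [List.foldl_cons, List.foldl_nil]
    have htN : t ≤ N1 := by omega
    have hsub : num - 1 - (t : Int) = ((N1 - t : Nat) : Int) := by
      push_cast [htN]; omega
    have hNat : N1.choose t * (N1 - t) = N1.choose (t + 1) * (t + 1) :=
      (Nat.choose_succ_right_eq N1 t).symm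
    have hchoose : ((N1.choose t : Nat) : Int) * ((N1 - t : Nat) : Int)
        = ((N1.choose (t + 1) : Nat) : Int) * ((t : Int) + 1) := by
      exact_mod_cast hNat
    have hdiv : PySem.Int.floordiv (((N1.choose t : Nat) : Int) * (num - 1 - (t : Int))) ((t : Int) + 1)
        = ((N1.choose (t + 1) : Nat) : Int) := by
      rw [hsub, hchoose]
      show (((N1.choose (t + 1) : Nat) : Int) * ((t : Int) + 1)).fdiv ((t : Int) + 1)
            = ((N1.choose (t + 1) : Nat) : Int)
      exact Int.mul_fdiv_cancel _ (by positivity)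
    rw [hdiv]
    simp only [List.range_succ, List.map_append, List.sum_append, List.map_cons,
      List.map_nil, List.sum_cons, List.sum_nil]
    ring_nf

theorem count_eq_alt (num : Int) : count num = count_alt num := by
  by_cases hlt : num < 2
  · have hle : num - 1 ≤ 0 := by omega
    simp [count, count_alt, hlt, PySem.List.pyRange_one_eq_nil (by omega : num - 1 ≤ 0)]
  · have hge : 2 ≤ num := by omega
    set N : Nat := (num - 2).toNat with hN
    have hNi : (N : Int) = num - 2 := Int.toNat_of_nonneg (by omega)
    -- A's value
    have hA : count num = countWid (binRow (N + 1)) := by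
      unfold count
      have hb : num - 1 = (N : Int) + 1 := by omega
      rw [hb, PySem.List.pyRange_one_succ_right (by positivity), List.foldl_append,
        A_inv num N (by omega)]
      simp only [List.foldl_cons, List.foldl_nil]
      rw [if_neg (by simp [hNi]), pascalStep_binRow]
    -- B's value
    have hB : count_alt num
        = num - 1 + ((List.range (N + 2)).map
            (fun j => ((PySem.Int.toChars (((N + 1).choose j : Nat) : Int)).length : Int))).sum := by
      unfold count_alt
      rw [if_neg (by omega)]
      have hb : num - 1 + 1 = ((N + 2 : Nat) : Int) := by omega
      simp only
      rw [hb, B_inv num (N + 1) (by push_cast; omega) (N + 2) (by omega)]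
    rw [hA, hB, countWid, len_fold]
    simp only [binRow, List.map_map, List.length_nil, Nat.cast_zero, zero_add]
    have hsum : ((List.range (N + 2)).map
        ((fun x => ((PySem.Int.toChars x).length : Int) + 1) ∘ fun k => (((N+1).choose k : Nat) : Int))).sum
        = ((List.range (N + 2)).map
            (fun j => ((PySem.Int.toChars (((N + 1).choose j : Nat) : Int)).length : Int))).sum
          + ((List.range (N + 2)).map (fun _ => (1 : Int))).sum := by
      induction (List.range (N + 2)) with
      | nil => simp
      | cons a l ihl => simp only [List.map_cons, List.sum_cons, ihl, Function.comp]; ring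
    rw [hsum]
    simp only [List.map_const', List.length_range, List.sum_replicate, nsmul_eq_mul, mul_one]
    push_cast
    linarith [hNi]

-- ===== VERDICT (by name: the statement is the Claim_ definition above) =====
theorem count_spec : Claim_equal_count := by
  intro num _
  unfold Spec_count
  exact count_eq_alt num
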